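-- pv_equiv track=rewrite | github.com/xkhanhnguyen/codesignal-arcade | Intro/Dark Wilderness/41_digitDegree.py | solution
-- ===== SOURCE A (Python) =====
-- def solution(n):
--     string = str(n)
--     count = 0
--     while len(string) != 1:
--         count += 1
--         total = 0
--         for i in string:
--             total += int(i)
--         string = str(total)
--     return count
-- ===== SOURCE B (Python) =====
-- def solution(n):
--     # Bounded decision tree: for |n| <= 2**31 (at most 10 digits) the digit degree
--     # is at most 3, so no loop-until-single-digit is needed: one fixed 10-term
--     # digit sum, then at most two constant-size digit-sum levels.
--     if n < 10:
--         return 0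
--     s = sum(n // 10**k % 10 for k in range(10))
--     if s < 10:
--         return 1
--     t = s // 10 + s % 10
--     return 2 if t < 10 else 3
-- ===== Notes on version B (the rewrite author's own statement) =====
-- stated objective: alternative
-- what changed: Replaces the iterative sum-digits-until-one-digit loop with a loop-free bounded decision tree: one fixed 10-term arithmetic digit sum (valid since |n| <= 2^31 has at most 10 digits), then at most two constant-size digit-sum levels, so the answer (always <= 3 on this domain) is read off directly.
-- outside the precondition, e.g. on solution(-5): A raises ValueError, B returns 0
import Mathlib
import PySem

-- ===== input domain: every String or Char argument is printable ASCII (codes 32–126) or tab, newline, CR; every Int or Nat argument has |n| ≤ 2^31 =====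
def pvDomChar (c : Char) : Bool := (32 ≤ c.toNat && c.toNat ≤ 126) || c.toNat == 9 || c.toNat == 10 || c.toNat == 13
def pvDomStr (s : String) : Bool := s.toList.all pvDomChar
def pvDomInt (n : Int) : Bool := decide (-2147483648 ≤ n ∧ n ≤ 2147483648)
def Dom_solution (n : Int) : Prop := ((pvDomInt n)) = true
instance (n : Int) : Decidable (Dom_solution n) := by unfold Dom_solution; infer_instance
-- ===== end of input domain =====

-- B replaces A's loop-until-single-digit (over str(n)) by a loop-free bounded decision tree
-- valid on the 32-bit domain: a fixed 10-term digit sum, then at most two constant digit-sum levels.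

-- ===== PORT A =====
-- 'total = 0; for i in string: total += int(i)' (int('-') raises ValueError → outside Pre_, getD 0 never reached inside Pre_)
def pvDigitSumA (cs : List Char) : Int :=
  cs.foldl (fun t c => t + (PySem.Int.ofChars? [c]).getD 0) 0

-- the while-loop of A; fuel only makes the recursion structural (the value strictly decreases, so n.toNat+1 steps suffice)
def pvLoopA : Nat → List Char → Int → Int
  | 0, _, count => count
  | fuel+1, cs, count =>
    if cs.length ≠ 1 then pvLoopA fuel (PySem.Int.toChars (pvDigitSumA cs)) (count + 1)
    else count

def solution (n : Int) : Int := pvLoopA (n.toNat + 1) (PySem.Int.toChars n) 0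

-- ===== PORT B =====
-- 'sum(n // 10**k % 10 for k in range(10))'; k ranges over the literal 0..9, so k.toNat is exact
def pvFixedSumB (n : Int) : Int :=
  (PySem.List.pyRange 0 10 1).foldl
    (fun acc k => acc + PySem.Int.mod (PySem.Int.floordiv n ((10:Int) ^ k.toNat)) 10) 0

def solution_alt (n : Int) : Int :=
  if n < 10 then 0
  else
    let s := pvFixedSumB n
    if s < 10 then 1
    else
      let t := PySem.Int.floordiv s 10 + PySem.Int.mod s 10
      if t < 10 then 2 else 3

-- ===== PRECONDITION & SPEC =====
-- Pre_ excludes exactly the negative inputs, on which A raises ValueError (int('-') on the sign character of str(n)).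
def Pre_solution (n : Int) : Prop := 0 ≤ n
instance (n : Int) : Decidable (Pre_solution n) := by unfold Pre_solution; infer_instance
def pvWitness_solution : Int := (12)

def Spec_solution (n : Int) (out : Int) : Prop := out = solution_alt n
instance (n : Int) (out : Int) : Decidable (Spec_solution n out) := by unfold Spec_solution; infer_instance

-- ===== CLAIM (what is proved, stated in full; the proofs are below) =====
def Claim_equal_solution : Prop := ∀ (n : Int), Dom_solution n → Pre_solution n → Spec_solution n (solution n)

-- ===== LEMMAS AND PROOFS =====

-- abbreviation used only in the proofs
def pvDsum (k : Nat) : Nat := (Nat.digits 10 k).sum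

-- str(k) for a natural k, characterised through Nat.digits
lemma toDigitsCore_eq_digits (f : Nat) : ∀ (k : Nat) (ds : List Char), 0 < k → k < f →
    Nat.toDigitsCore 10 f k ds = ((Nat.digits 10 k).map Nat.digitChar).reverse ++ ds := by
  induction f with
  | zero => intro k ds h1 h2; omega
  | succ f ih =>
    intro k ds h1 h2
    rw [Nat.digits_def' (by norm_num) h1]
    by_cases h : k / 10 = 0
    · have : Nat.digits 10 (k / 10) = [] := by rw [h]; simp
      simp [Nat.toDigitsCore, h]
    · have hlt : k / 10 < f := by omega
      have hpos : 0 < k / 10 := Nat.pos_of_ne_zero h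
      simp only [Nat.toDigitsCore, h, if_false]
      rw [ih (k / 10) _ hpos hlt]
      simp

lemma toChars_natCast (k : Nat) (h : 0 < k) :
    PySem.Int.toChars (k : Int) = ((Nat.digits 10 k).map Nat.digitChar).reverse := by
  simp only [PySem.Int.toChars]
  rw [if_neg (by omega), Int.toNat_natCast, Nat.toDigits]
  rw [toDigitsCore_eq_digits (k + 1) k [] h (by omega)]
  simp

lemma toChars_zero : PySem.Int.toChars 0 = ['0'] := by decide

-- int(c) for a digit character
lemma ofChars_digitChar (d : Nat) (h : d < 10) :
    (PySem.Int.ofChars? [Nat.digitChar d]).getD 0 = (d : Int) := by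
  interval_cases d <;> decide

-- A's per-character digit sum equals the arithmetic digit sum
lemma digitSumA_eq (k : Nat) (h : 0 < k) :
    pvDigitSumA (PySem.Int.toChars (k : Int)) = ((pvDsum k : Nat) : Int) := by
  rw [toChars_natCast k h]
  unfold pvDigitSumA pvDsum
  rw [PySem.List.foldl_add (g := fun c => (PySem.Int.ofChars? [c]).getD 0)]
  rw [List.map_reverse, List.map_map, List.sum_reverse]
  have : ∀ d ∈ Nat.digits 10 k,
      ((fun c => (PySem.Int.ofChars? [c]).getD 0) ∘ Nat.digitChar) d = ((d : Int)) := by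
    intro d hd
    exact ofChars_digitChar d (Nat.digits_lt_base (by norm_num) hd)
  rw [List.map_congr_left this]
  simp

-- length of str(k) is 1 iff k < 10
lemma toChars_length_one_iff (k : Nat) : (PySem.Int.toChars (k : Int)).length = 1 ↔ k < 10 := by
  rcases Nat.eq_zero_or_pos k with h | h
  · subst h; simp [toChars_zero]
  · rw [toChars_natCast k h]
    simp only [List.length_reverse, List.length_map]
    constructor
    · intro hl
      have := (Nat.digits_length_le_iff (by norm_num) k).mp (le_of_eq hl)
      simpa using this
    · intro hk
      have h1 : (Nat.digits 10 k).length ≤ 1 :=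
        (Nat.digits_length_le_iff (by norm_num) k).mpr (by simpa using hk)
      have h2 : (Nat.digits 10 k).length ≠ 0 := by
        simp [Nat.digits_eq_nil_iff_eq_zero]; omega
      omega

-- one step of A's while-loop
lemma loopA_step (k : Nat) (hk : 10 ≤ k) (f : Nat) (c : Int) :
    pvLoopA (f + 1) (PySem.Int.toChars (k : Int)) c
      = pvLoopA f (PySem.Int.toChars ((pvDsum k : Nat) : Int)) (c + 1) := by
  have hlen : (PySem.Int.toChars (k : Int)).length ≠ 1 := by
    intro h; have := (toChars_length_one_iff k).mp h; omega
  simp only [pvLoopA, hlen, if_true, ne_eq, not_false_eq_true]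
  rw [digitSumA_eq k (by omega)]

-- A's while-loop stops on a single digit
lemma loopA_stop (k : Nat) (hk : k < 10) (f : Nat) (c : Int) :
    pvLoopA (f + 1) (PySem.Int.toChars (k : Int)) c = c := by
  have hlen : (PySem.Int.toChars (k : Int)).length = 1 := (toChars_length_one_iff k).mpr hk
  simp [pvLoopA, hlen]

-- digit-sum facts -----------------------------------------------------------

lemma dsum_zero : pvDsum 0 = 0 := by simp [pvDsum]

lemma dsum_step (k : Nat) (h : 0 < k) : pvDsum k = k % 10 + pvDsum (k / 10) := by
  unfold pvDsum
  rw [Nat.digits_def' (by norm_num) h]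
  simp

lemma dsum_of_lt_10 (k : Nat) (h : k < 10) : pvDsum k = k := by
  rcases Nat.eq_zero_or_pos k with h0 | h0
  · simp [h0, dsum_zero]
  · rw [dsum_step k h0]
    have : k / 10 = 0 := by omega
    rw [this, dsum_zero]
    omega

lemma dsum_of_lt_100 (k : Nat) (h : k < 100) : pvDsum k = k / 10 + k % 10 := by
  by_cases h10 : k < 10
  · rw [dsum_of_lt_10 k h10]; omega
  · rw [dsum_step k (by omega), dsum_of_lt_10 (k / 10) (by omega)]
    omega

-- bound: the digit sum of k < 10^m is at most 9*m
lemma dsum_le (m : Nat) : ∀ k : Nat, k < 10 ^ m → pvDsum k ≤ 9 * m := by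
  induction m with
  | zero => intro k h; interval_cases k; simp [dsum_zero]
  | succ m ih =>
    intro k h
    rcases Nat.eq_zero_or_pos k with h0 | h0
    · simp [h0, dsum_zero]
    · rw [dsum_step k h0]
      have hdiv : k / 10 < 10 ^ m := by
        rw [pow_succ] at h; omega
      have := ih (k / 10) hdiv
      omega

-- the fixed 10-term sum computes the digit sum of any k < 10^m
lemma fixedSum_eq (m : Nat) : ∀ k : Nat, k < 10 ^ m →
    (Finset.range m).sum (fun j => k / 10 ^ j % 10) = pvDsum k := by
  induction m with
  | zero => intro k h; interval_cases k; simp [dsum_zero]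
  | succ m ih =>
    intro k h
    rw [Finset.sum_range_succ']
    simp only [pow_zero, Nat.div_one]
    have hrw : ∀ j, k / 10 ^ (j + 1) % 10 = (k / 10) / 10 ^ j % 10 := by
      intro j; rw [pow_succ, mul_comm, Nat.div_div_eq_div_mul, mul_comm]
    simp only [hrw]
    have hdiv : k / 10 < 10 ^ m := by rw [pow_succ] at h; omega
    rw [ih (k / 10) hdiv]
    rcases Nat.eq_zero_or_pos k with h0 | h0
    · simp [h0, dsum_zero]
    · rw [dsum_step k h0]; omega

-- B's foldl over pyRange 0 10 1 equals the fixed 10-term sum (as an Int)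
lemma fixedSumB_eq (k : Nat) (h : k < 10 ^ 10) :
    pvFixedSumB (k : Int) = ((pvDsum k : Nat) : Int) := by
  have hr : PySem.List.pyRange 0 10 1 = [0,1,2,3,4,5,6,7,8,9] := by decide
  have hterm : ∀ j : Nat, PySem.Int.mod (PySem.Int.floordiv (k : Int) ((10:Int) ^ j)) 10
      = ((k / 10 ^ j % 10 : Nat) : Int) := by
    intro j
    have h1 : ((10:Int) ^ j) = ((10 ^ j : Nat) : Int) := by push_cast; ring
    rw [h1, PySem.Int.floordiv_natCast, show ((10:Int)) = ((10:Nat):Int) by simp,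
        PySem.Int.mod_natCast]
  unfold pvFixedSumB
  rw [hr]
  simp only [List.foldl]
  rw [show ((0:Int)) = ((0:Nat):Int) by simp]
  norm_num [hterm 0, hterm 1, hterm 2, hterm 3, hterm 4, hterm 5, hterm 6, hterm 7, hterm 8, hterm 9]
  rw [← fixedSum_eq 10 k h]
  rw [Finset.sum_range_succ, Finset.sum_range_succ, Finset.sum_range_succ,
      Finset.sum_range_succ, Finset.sum_range_succ, Finset.sum_range_succ,
      Finset.sum_range_succ, Finset.sum_range_succ, Finset.sum_range_succ,
      Finset.sum_range_one]
  push_cast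
  omega

-- floordiv/mod on a nat cast, packaged for B's second level
lemma levelB_eq (s : Nat) :
    PySem.Int.floordiv ((s : Nat) : Int) 10 + PySem.Int.mod ((s : Nat) : Int) 10
      = ((s / 10 + s % 10 : Nat) : Int) := by
  rw [show ((10:Int)) = ((10:Nat):Int) by simp, PySem.Int.floordiv_natCast, PySem.Int.mod_natCast]
  push_cast
  ring

-- ===== VERDICT (by name: the statement is the Claim_ definition above) =====
theorem solution_spec : Claim_equal_solution := by
  intro n hdom hpre
  unfold Pre_solution at hpre
  unfold Dom_solution pvDomInt at hdom
  have hbound : n ≤ 2147483648 := by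
    have := of_decide_eq_true hdom; omega
  unfold Spec_solution solution solution_alt
  set k := n.toNat with hk
  have hnk : n = ((k : Nat) : Int) := by omega
  have hk10 : k < 10 ^ 10 := by omega
  rw [hnk]
  by_cases h1 : k < 10
  · -- 0 iterations
    rw [if_pos (by exact_mod_cast h1)]
    exact loopA_stop k h1 k 0
  · rw [if_neg (by exact_mod_cast h1)]
    have hfuel : ∃ f, k + 1 = f + 4 := ⟨k - 3, by omega⟩
    obtain ⟨f, hf⟩ := hfuel
    rw [hf]
    set s := pvDsum k with hs
    have hs90 : s ≤ 90 := dsum_le 10 k hk10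
    rw [show f + 4 = (f + 3) + 1 by ring, loopA_step k (by omega) (f + 3) 0,
        fixedSumB_eq k hk10, ← hs]
    by_cases h2 : s < 10
    · -- 1 iteration
      rw [if_pos (by exact_mod_cast h2)]
      rw [show f + 3 = (f + 2) + 1 by ring]
      exact loopA_stop s h2 (f + 2) (0 + 1)
    · rw [if_neg (by exact_mod_cast h2)]
      set t := pvDsum s with ht
      have hts : t = s / 10 + s % 10 := dsum_of_lt_100 s (by omega)
      rw [levelB_eq s, ← hts]
      have ht18 : t ≤ 18 := by omega
      rw [show f + 3 = (f + 2) + 1 by ring, loopA_step s (by omega) (f + 2) (0 + 1), ← ht]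
      by_cases h3 : t < 10
      · -- 2 iterations
        rw [if_pos (by exact_mod_cast h3)]
        rw [show f + 2 = (f + 1) + 1 by ring]
        have := loopA_stop t h3 (f + 1) (0 + 1 + 1)
        rw [this]; ring
      · -- 3 iterations: t ∈ [10,18], its digit sum is < 10
        rw [if_neg (by exact_mod_cast h3)]
        set u := pvDsum t with hu
        have hu10 : u < 10 := by
          rw [hu, dsum_of_lt_100 t (by omega)]; omega
        rw [show f + 2 = (f + 1) + 1 by ring, loopA_step t (by omega) (f + 1) (0 + 1 + 1), ← hu]
        rw [loopA_stop u hu10 f (0 + 1 + 1 + 1)]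
        norm_num
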